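-- pv_equiv track=rewrite | github.com/DaniYuna99/Programacion2022-2023 | Python_proyectos_Parte2/bol8_ProgramacionModular_1/ejercicio6_UsandoSort.py | estaOrdenadaAscendentemente
-- ===== SOURCE A (Python) =====
-- def estaOrdenadaAscendentemente (lista) :
--
--     listaOrdenada = []
--
--     for elemento in (lista) :
--         listaOrdenada.append(elemento)
--
--     listaOrdenada.sort()
--
--     ordenadaONo = True
--     noPasesPorAqui = False
--
--
--     for indice in range (0, (len(lista) - 1)) :
--
--         if ((lista[indice] == listaOrdenada[indice]) and (noPasesPorAqui == False)) :
--             ordenadaONo = True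
--
--         elif (lista[indice] != listaOrdenada[indice]) :
--             ordenadaONo = False
--             noPasesPorAqui = True
--
--
--     return ordenadaONo
-- ===== SOURCE B (Python) =====
-- def estaOrdenadaAscendentemente(lista):
--     return all(x <= y for x, y in zip(lista, lista[1:]))
-- ===== Notes on version B (the rewrite author's own statement) =====
-- stated objective: faster
-- what changed: replaced copy+sort+elementwise-comparison-with-flag-loop by a single linear pass comparing adjacent elements
import Mathlib
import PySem

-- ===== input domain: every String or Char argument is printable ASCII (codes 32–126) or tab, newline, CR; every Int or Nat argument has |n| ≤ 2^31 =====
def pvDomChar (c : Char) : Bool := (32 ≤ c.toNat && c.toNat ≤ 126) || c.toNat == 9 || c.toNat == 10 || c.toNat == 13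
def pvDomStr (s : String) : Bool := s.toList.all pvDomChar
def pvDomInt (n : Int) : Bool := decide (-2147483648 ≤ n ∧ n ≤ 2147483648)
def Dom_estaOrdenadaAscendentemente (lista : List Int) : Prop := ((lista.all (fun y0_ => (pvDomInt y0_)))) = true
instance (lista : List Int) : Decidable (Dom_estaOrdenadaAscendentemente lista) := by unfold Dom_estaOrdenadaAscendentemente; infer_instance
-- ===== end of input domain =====

-- B replaces A's copy + sort + flagged elementwise comparison by one linear pass over
-- adjacent pairs (asymptotically faster, O(n) vs O(n log n)).

-- ===== PORT A =====
-- the loop body of A's second for-loop, state = (ordenadaONo, noPasesPorAqui)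
def pvStepA (lista listaOrdenada : List Int) (st : Bool × Bool) (indice : Int) : Bool × Bool :=
  if (PySem.List.pyGetD lista indice 0 == PySem.List.pyGetD listaOrdenada indice 0)
      && (st.2 == false) then
    (true, st.2)
  else if PySem.List.pyGetD lista indice 0 != PySem.List.pyGetD listaOrdenada indice 0 then
    (false, true)
  else st

def estaOrdenadaAscendentemente (lista : List Int) : Bool :=
  let listaOrdenada := lista.foldl (fun acc elemento => acc ++ [elemento]) []
  let listaOrdenada := PySem.List.sorted listaOrdenada (fun x => x) false
  let st := (PySem.List.pyRange 0 ((lista.length : Int) - 1) 1).foldl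
    (pvStepA lista listaOrdenada) (true, false)
  st.1

-- ===== PORT B =====
def estaOrdenadaAscendentemente_alt (lista : List Int) : Bool :=
  (lista.zip (PySem.List.slice lista (some 1) none)).all (fun p => p.1 ≤ p.2)

-- ===== PRECONDITION & SPEC =====
def Spec_estaOrdenadaAscendentemente (lista : List Int) (out : Bool) : Prop := out = estaOrdenadaAscendentemente_alt lista
instance (lista : List Int) (out : Bool) : Decidable (Spec_estaOrdenadaAscendentemente lista out) := by unfold Spec_estaOrdenadaAscendentemente; infer_instance

-- ===== CLAIM (what is proved, stated in full; the proofs are below) =====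
def Claim_equal_estaOrdenadaAscendentemente : Prop := ∀ (lista : List Int), Dom_estaOrdenadaAscendentemente lista → Spec_estaOrdenadaAscendentemente lista (estaOrdenadaAscendentemente lista)

-- ===== LEMMAS AND PROOFS =====

-- B computes Chain' (· ≤ ·)
theorem alt_eq_chain' (lista : List Int) :
    estaOrdenadaAscendentemente_alt lista = decide (List.IsChain (· ≤ ·) lista) := by
  unfold estaOrdenadaAscendentemente_alt
  rw [PySem.List.slice_from lista (by norm_num)]
  simp only [Int.toNat_one]
  induction lista with
  | nil => simp
  | cons x xs ih =>
    cases xs with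
    | nil => simp
    | cons y ys =>
      simp only [List.drop_one, List.tail_cons, List.zip_cons_cons, List.all_cons] at ih ⊢
      rw [ih]
      by_cases h : x ≤ y <;> simp [h]

-- invariant of A's flag loop: from a state (b, !b) the fold returns (b && all-match, ¬(b && all-match))
theorem foldl_stepA (lista s : List Int) (idxs : List Int) (b : Bool) :
    idxs.foldl (pvStepA lista s) (b, !b) =
      (b && idxs.all (fun i => PySem.List.pyGetD lista i 0 == PySem.List.pyGetD s i 0),
       !(b && idxs.all (fun i => PySem.List.pyGetD lista i 0 == PySem.List.pyGetD s i 0))) := by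
  induction idxs generalizing b with
  | nil => simp
  | cons i rest ih =>
    simp only [List.foldl_cons, List.all_cons]
    have h0 := ih false
    have h1 := ih true
    simp only [Bool.not_false, Bool.not_true] at h0 h1
    by_cases hm : PySem.List.pyGetD lista i 0 = PySem.List.pyGetD s i 0 <;>
      cases b <;>
      simp [pvStepA, hm, h0, h1]

-- the first n-1 elements of lista agreeing with sorted(lista) forces full equality
theorem take_pred_eq_imp_eq (lista : List Int)
    (h : ∀ k : Nat, k < lista.length - 1 →
        lista.getD k 0 = (PySem.List.sorted lista (fun x => x) false).getD k 0) :
    lista = PySem.List.sorted lista (fun x => x) false := by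
  set s := PySem.List.sorted lista (fun x => x) false with hs
  have hperm : s.Perm lista := PySem.List.sorted_perm lista (fun x => x) false
  have hlen : s.length = lista.length := hperm.length_eq
  cases hn : lista.length with
  | zero =>
    have : s.length = 0 := by omega
    simp_all [List.length_eq_zero_iff]
  | succ m =>
    have htake : lista.take m = s.take m := by
      apply List.ext_getElem (by simp; omega)
      intro i h1 h2
      have hi : i < m := by simp at h1; omega
      have := h i (by omega)
      rwa [List.getD_eq_getElem _ _ (by omega), List.getD_eq_getElem _ _ (by omega),
        ← List.getElem_take (xs := lista) (h := h1), ← List.getElem_take (xs := s) (h := h2)] at this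
    have hd1 : (lista.drop m).length = 1 := by simp; omega
    have hd2 : (s.drop m).length = 1 := by simp; omega
    obtain ⟨a, ha⟩ := List.length_eq_one_iff.mp hd1
    obtain ⟨b, hb⟩ := List.length_eq_one_iff.mp hd2
    have hsplit1 : lista = lista.take m ++ [a] := by rw [← ha, List.take_append_drop]
    have hsplit2 : s = s.take m ++ [b] := by rw [← hb, List.take_append_drop]
    have hperm' : (s.take m ++ [b]).Perm (s.take m ++ [a]) := by
      rw [← hsplit2, ← htake, ← hsplit1]; exact hperm
    have : ([b] : List Int).Perm [a] := (List.perm_append_left_iff _).mp hperm'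
    have hab : a = b := by
      have := this.mem_iff (a := b); simp at this; omega
    rw [hsplit1, hsplit2, htake, hab]

theorem A_eq_chain' (lista : List Int) :
    estaOrdenadaAscendentemente lista = decide (List.IsChain (· ≤ ·) lista) := by
  unfold estaOrdenadaAscendentemente
  rw [PySem.List.foldl_append_singleton_eq_self]
  simp only [List.nil_append]
  set s := PySem.List.sorted lista (fun x => x) false with hs
  have h := foldl_stepA lista s (PySem.List.pyRange 0 ((lista.length : Int) - 1) 1) true
  simp only [Bool.not_true, Bool.true_and] at h
  rw [h]
  -- both sides ↔ lista = s
  have hchain : List.IsChain (· ≤ ·) lista ↔ lista = s := by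
    constructor
    · intro hc
      exact (PySem.List.sorted_eq_self_of_pairwise lista (fun x => x)
        (by simpa using List.isChain_iff_pairwise.mp hc)).symm
    · intro he
      rw [he]
      exact List.isChain_iff_pairwise.mpr
        (by simpa using PySem.List.sorted_pairwise lista (fun x => x))
  rw [PySem.List.pyRange_one]
  simp only [Int.sub_zero]
  by_cases heq : lista = s
  · have hcd : List.IsChain (· ≤ ·) lista := hchain.mpr heq
    rw [heq] at hcd
    simp [heq, hcd]
  · have hnc : ¬ List.IsChain (· ≤ ·) lista := fun hc => heq (hchain.mp hc)
    simp only [hnc, decide_false]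
    rw [Bool.eq_false_iff]
    intro hall
    simp only [List.all_map, List.all_eq_true, List.mem_range, Function.comp] at hall
    apply heq
    rw [hs]
    apply take_pred_eq_imp_eq
    intro k hk
    have hthis := hall k (by omega)
    simp only [zero_add, beq_iff_eq, PySem.List.pyGetD_natCast] at hthis
    rw [hs] at hthis
    exact hthis

-- ===== VERDICT (by name: the statement is the Claim_ definition above) =====
theorem estaOrdenadaAscendentemente_spec : Claim_equal_estaOrdenadaAscendentemente := by
  intro lista _
  unfold Spec_estaOrdenadaAscendentemente
  rw [A_eq_chain', alt_eq_chain']
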